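-- pv_equiv track=rewrite | github.com/ICSE26Autoscope/Autoscope | AutoScope/spanselection/utils/GraphUtil.py | split_path_into_distinct_branch
-- ===== SOURCE A (Python) =====
-- from collections import defaultdict, deque
--
-- def split_path_into_segments(edge_list, path):
--
--     graph = defaultdict(list)
--     for u, v in edge_list:
--         graph[u].append(v)
--
--     segments = []
--     current_segment = []
--
--     for i in range(len(path)):
--         node = path[i]
--         current_segment.append(node)
--
--         successors = graph.get(node, [])
--
--         if len(successors) > 1:
--             segments.append(current_segment)
--             current_segment = []
--         elif i == len(path) - 1:
--             segments.append(current_segment)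
--
--     return segments
--
-- def split_path_into_distinct_branch(edge_list, path):
--     """
--
--     :param edge_list:
--     :param root:
--     :param path:
--     :return:
--     """
--     segments = split_path_into_segments(edge_list, path)
--     distinct_nodes = [node for node in path]
--
--     distinct_segments = []
--     for segment in segments:
--         filtered_segment = [node for node in segment if node in distinct_nodes]
--         if filtered_segment:
--             distinct_segments.append(filtered_segment)
--
--     return distinct_segments
-- ===== SOURCE B (Python) =====
-- from collections import Counter
--
-- def split_path_into_distinct_branch(edge_list, path):
--     counts = Counter(u for u, _ in edge_list)
--     forks = {u for u, c in counts.items() if c >= 2}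
--     branches = []
--     start = 0
--     for i, node in enumerate(path):
--         if node in forks:
--             branches.append(path[start:i + 1])
--             start = i + 1
--     if start < len(path):
--         branches.append(path[start:])
--     return branches
-- ===== Notes on version B (the rewrite author's own statement) =====
-- stated objective: faster
-- what changed: B replaces A's adjacency-dict build, node-by-node segment accumulation and quadratic no-op 'node in distinct_nodes' filtering pass with a Counter over edge sources to find fork nodes and a single scan that slices path at the cut indices plus one trailing slice.
import Mathlib
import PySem

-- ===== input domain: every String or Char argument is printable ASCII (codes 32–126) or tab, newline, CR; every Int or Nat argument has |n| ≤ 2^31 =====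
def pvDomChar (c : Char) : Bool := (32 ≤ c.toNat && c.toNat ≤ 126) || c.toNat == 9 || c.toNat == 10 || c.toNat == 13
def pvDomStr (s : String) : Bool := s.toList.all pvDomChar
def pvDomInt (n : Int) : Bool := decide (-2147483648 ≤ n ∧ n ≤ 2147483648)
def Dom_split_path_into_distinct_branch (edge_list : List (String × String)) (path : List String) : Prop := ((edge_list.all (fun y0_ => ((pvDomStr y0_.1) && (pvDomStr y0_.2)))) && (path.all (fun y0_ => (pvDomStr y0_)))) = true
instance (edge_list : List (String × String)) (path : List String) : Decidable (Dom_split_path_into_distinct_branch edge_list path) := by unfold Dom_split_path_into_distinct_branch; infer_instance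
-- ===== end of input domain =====

-- B finds the fork nodes with a Counter over edge sources and builds the result by slicing path at the
-- cut indices, dropping A's no-op 'node in distinct_nodes' filtering pass (objective: faster, measured).

-- ===== PORT A =====
def split_path_into_distinct_branch (edge_list : List (String × String)) (path : List String) : List (List String) :=
  -- split_path_into_segments
  let graph : PySem.Dict String (List String) :=
    edge_list.foldl (fun d p => d.modify p.1 [] (fun l => l ++ [p.2])) PySem.Dict.empty
  let st := (PySem.List.enumerate path).foldl
    (fun (st : List (List String) × List String) p =>
      let current_segment := st.2 ++ [p.2]
      let successors := graph.getD p.2 []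
      if successors.length > 1 then (st.1 ++ [current_segment], [])
      else if p.1 = (path.length : Int) - 1 then (st.1 ++ [current_segment], current_segment)
      else (st.1, current_segment))
    ([], [])
  let segments := st.1
  -- distinct_nodes = [node for node in path]
  let distinct_nodes := path.map (fun node => node)
  segments.foldl
    (fun acc segment =>
      let filtered_segment := segment.filter (fun node => distinct_nodes.contains node)
      if filtered_segment ≠ [] then acc ++ [filtered_segment] else acc)
    []

-- ===== PORT B =====
def split_path_into_distinct_branch_alt (edge_list : List (String × String)) (path : List String) : List (List String) :=
  let counts : PySem.Dict String Int := PySem.Dict.counter (edge_list.map (fun p => p.1))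
  let forks : PySem.Set String :=
    PySem.Set.ofList ((counts.items.filter (fun p => 2 ≤ p.2)).map (fun p => p.1))
  let st := (PySem.List.enumerate path).foldl
    (fun (st : List (List String) × Int) p =>
      if PySem.Set.contains forks p.2 then
        (st.1 ++ [PySem.List.slice path (some st.2) (some (p.1 + 1))], p.1 + 1)
      else st)
    ([], 0)
  if st.2 < (path.length : Int) then st.1 ++ [PySem.List.slice path (some st.2) none] else st.1

-- ===== PRECONDITION & SPEC =====
def Spec_split_path_into_distinct_branch (edge_list : List (String × String)) (path : List String) (out : List (List String)) : Prop := out = split_path_into_distinct_branch_alt edge_list path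
instance (edge_list : List (String × String)) (path : List String) (out : List (List String)) : Decidable (Spec_split_path_into_distinct_branch edge_list path out) := by unfold Spec_split_path_into_distinct_branch; infer_instance

-- ===== CLAIM (what is proved, stated in full; the proofs are below) =====
def Claim_equal_split_path_into_distinct_branch : Prop := ∀ (edge_list : List (String × String)) (path : List String), Dom_split_path_into_distinct_branch edge_list path → Spec_split_path_into_distinct_branch edge_list path (split_path_into_distinct_branch edge_list path)

-- ===== LEMMAS AND PROOFS =====

-- reference segmentation: cut after every fork node, flush the non-empty remainder at the end
def specB (fork : String → Bool) : List String → List String → List (List String)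
  | cur, [] => if cur = [] then [] else [cur]
  | cur, x :: xs =>
    if fork x then (cur ++ [x]) :: specB fork [] xs else specB fork (cur ++ [x]) xs

-- every segment produced is non-empty and drawn from cur ++ xs
theorem specB_mem (fork : String → Bool) (xs : List String) :
    ∀ cur seg, seg ∈ specB fork cur xs → seg ≠ [] ∧ ∀ a ∈ seg, a ∈ cur ++ xs := by
  induction xs with
  | nil =>
    intro cur seg h
    by_cases hc : cur = []
    · simp [specB, hc] at h
    · simp only [specB, if_neg hc, List.mem_singleton] at h
      subst h
      exact ⟨hc, fun a ha => List.mem_append_left _ ha⟩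
  | cons x rest ih =>
    intro cur seg h
    simp only [specB] at h
    by_cases hf : fork x
    · rw [if_pos hf] at h
      rcases List.mem_cons.mp h with h | h
      · subst h
        refine ⟨by simp, fun a ha => ?_⟩
        rcases List.mem_append.mp ha with h' | h'
        · exact List.mem_append_left _ h'
        · simp at h'; subst h'; simp
      · rcases ih [] seg h with ⟨hne, hsub⟩
        refine ⟨hne, fun a ha => ?_⟩
        have := hsub a ha; simp at this; simp [this]
    · rw [if_neg hf] at h
      rcases ih (cur ++ [x]) seg h with ⟨hne, hsub⟩
      refine ⟨hne, fun a ha => ?_⟩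
      have := hsub a ha
      simp only [List.append_assoc, List.cons_append, List.nil_append] at this ⊢
      exact this

-- A's segmentation loop, with the fork test abstracted, computes specB
theorem loopA (fork : String → Bool) (n : Int) :
    ∀ (xs : List String) (s : Int), s + xs.length = n →
    ∀ (segs : List (List String)) (cur : List String), (xs = [] → cur = []) →
    ((PySem.List.enumerate xs s).foldl
      (fun (st : List (List String) × List String) p =>
        if fork p.2 then (st.1 ++ [st.2 ++ [p.2]], [])
        else if p.1 = n - 1 then (st.1 ++ [st.2 ++ [p.2]], st.2 ++ [p.2])
        else (st.1, st.2 ++ [p.2]))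
      (segs, cur)).1 = segs ++ specB fork cur xs := by
  intro xs
  induction xs with
  | nil =>
    intro s _ segs cur hcur
    simp [PySem.List.enumerate_nil, specB, hcur rfl]
  | cons x rest ih =>
    intro s hs segs cur _
    have hs' : s + 1 + (rest.length : Int) = n := by
      simp only [List.length_cons] at hs; push_cast at hs ⊢; omega
    rw [PySem.List.enumerate_cons, List.foldl_cons]
    by_cases hf : fork x
    · simp only [hf, if_true]
      rw [ih (s + 1) hs' (segs ++ [cur ++ [x]]) [] (fun _ => rfl)]
      simp [specB, hf]
    · simp only [hf, Bool.false_eq_true, if_false]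
      cases rest with
      | nil =>
        have hlast : s = n - 1 := by simp at hs'; omega
        rw [if_pos hlast]
        simp [PySem.List.enumerate_nil, specB, hf]
      | cons y t =>
        have hnotlast : ¬ (s = n - 1) := by
          have : (0:Int) < ((y :: t).length : Int) := by simp
          omega
        rw [if_neg hnotlast]
        rw [ih (s + 1) hs' segs (cur ++ [x]) (by simp)]
        simp [specB, hf]

-- B's trailing flush
def flushB (path : List String) (r : List (List String) × Int) : List (List String) :=
  if r.2 < (path.length : Int) then r.1 ++ [PySem.List.slice path (some r.2) none] else r.1

-- one slice step: path[start:k+1] = path[start:k] ++ [path[k]]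
theorem slice_snoc (path : List String) (start k : Nat) (hsk : start ≤ k) (hk : k < path.length) :
    (path.drop start).take (k + 1 - start) = (path.drop start).take (k - start) ++ [path[k]] := by
  have h1 : k + 1 - start = (k - start) + 1 := by omega
  rw [h1, List.take_add_one]
  congr 1
  have hidx : k - start < (path.drop start).length := by simp; omega
  rw [List.getElem?_eq_getElem hidx]
  simp only [List.getElem_drop, Option.toList_some]
  congr 2
  omega

-- B's loop plus the trailing flush computes specB
theorem loopB (fork : String → Bool) (path : List String) :
    ∀ (m k : Nat), k + m = path.length → ∀ (start : Nat), start ≤ k →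
    ∀ (segs : List (List String)),
    flushB path
      ((PySem.List.enumerate (path.drop k) (k : Int)).foldl
        (fun (st : List (List String) × Int) p =>
          if fork p.2 then
            (st.1 ++ [PySem.List.slice path (some st.2) (some (p.1 + 1))], p.1 + 1)
          else st)
        (segs, (start : Int)))
    = segs ++ specB fork ((path.drop start).take (k - start)) (path.drop k) := by
  intro m
  induction m with
  | zero =>
    intro k hk start hstart segs
    have hk' : k = path.length := by omega
    subst hk'
    simp only [List.drop_length, PySem.List.enumerate_nil, List.foldl_nil, flushB]
    have htake : (path.drop start).take (path.length - start) = path.drop start := by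
      apply List.take_of_length_le; simp
    rw [htake]
    by_cases hlt : start < path.length
    · rw [if_pos (by exact_mod_cast hlt)]
      rw [PySem.List.slice_from_natCast]
      simp only [specB]
      rw [if_neg (by
        intro hcontra
        have : path.length ≤ start := List.drop_eq_nil_iff.mp hcontra
        omega)]
    · have hse : start = path.length := by omega
      subst hse
      rw [if_neg (by omega)]
      simp [specB]
  | succ m ih =>
    intro k hk start hstart segs
    have hklt : k < path.length := by omega
    have hdrop : path.drop k = path[k] :: path.drop (k + 1) :=
      List.drop_eq_getElem_cons hklt
    rw [hdrop, PySem.List.enumerate_cons, List.foldl_cons]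
    by_cases hf : fork path[k]
    · simp only [hf, if_true]
      have hrec := ih (k + 1) (by omega) (k + 1) (le_refl _)
        (segs ++ [PySem.List.slice path (some (start : Int)) (some ((k : Int) + 1))])
      push_cast at hrec
      rw [hrec]
      have hseg : PySem.List.slice path (some (start : Int)) (some ((k : Int) + 1))
          = (path.drop start).take (k - start) ++ [path[k]] := by
        have hcast : (k : Int) + 1 = ((k + 1 : Nat) : Int) := by push_cast; ring
        rw [hcast, PySem.List.slice_natCast]
        exact slice_snoc path start k hstart hklt
      rw [hseg]
      simp [specB, hf]
    · simp only [hf, Bool.false_eq_true, if_false]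
      have hrec := ih (k + 1) (by omega) start (by omega) segs
      push_cast at hrec
      rw [hrec]
      rw [slice_snoc path start k hstart hklt]
      simp [specB, hf]

-- the canonical fork test: the node is the source of at least two edges
def forkOf (edge_list : List (String × String)) (node : String) : Bool :=
  decide (2 ≤ (edge_list.map (fun p => p.1)).count node)

-- A's fork test (successor-list length) agrees with the canonical one
theorem forkA_eq (edge_list : List (String × String)) (node : String) :
    (((edge_list.foldl (fun d p => d.modify p.1 [] (fun l => l ++ [p.2]))
        PySem.Dict.empty).getD node []).length > 1) ↔ forkOf edge_list node = true := by
  rw [PySem.Dict.getD_foldl_modify_append]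
  simp only [PySem.Dict.getD_empty, List.nil_append, List.length_map, forkOf,
    decide_eq_true_eq, List.count, List.countP_map, ← List.countP_eq_length_filter]
  have hcomp : ((fun x => x == node) ∘ fun p : String × String => p.1)
      = (fun p : String × String => p.1 == node) := rfl
  rw [hcomp]
  omega

-- B's fork test (membership in the >=2-count key set) agrees with the canonical one
theorem forkB_eq (edge_list : List (String × String)) (node : String) :
    PySem.Set.contains
      (PySem.Set.ofList
        (((PySem.Dict.counter (edge_list.map (fun p => p.1))).items.filter
            (fun p => 2 ≤ p.2)).map (fun p => p.1)))
      node = forkOf edge_list node := by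
  rw [PySem.Dict.items_counter, Bool.eq_iff_iff]
  simp only [PySem.Set.contains, List.contains_iff_mem, PySem.Set.mem_ofList,
    List.mem_map, List.mem_filter]
  unfold forkOf
  simp only [decide_eq_true_eq]
  constructor
  · rintro ⟨p, ⟨⟨k, _, rfl⟩, hc⟩, hn⟩
    simp only at hn
    subst hn
    dsimp only at hc
    exact_mod_cast hc
  · intro h
    refine ⟨(node, ((edge_list.map (fun p => p.1)).count node : Int)), ⟨⟨node, ?_, rfl⟩, ?_⟩, rfl⟩
    · have hmem : node ∈ edge_list.map (fun p => p.1) := List.count_pos_iff.mp (by omega)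
      rcases List.mem_map.mp hmem with ⟨q, hq, rfl⟩
      exact ⟨q, hq, rfl⟩
    · dsimp only
      exact_mod_cast h

-- ===== VERDICT (by name: the statement is the Claim_ definition above) =====
theorem split_path_into_distinct_branch_spec : Claim_equal_split_path_into_distinct_branch := by
  intro edge_list path _
  unfold Spec_split_path_into_distinct_branch
  unfold split_path_into_distinct_branch split_path_into_distinct_branch_alt
  dsimp only
  -- A's segmentation loop: replace the successor-length test by the canonical fork test
  rw [PySem.List.foldl_congr_mem (PySem.List.enumerate path) _
    (fun (st : List (List String) × List String) (p : Int × String) =>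
      if forkOf edge_list p.2 then (st.1 ++ [st.2 ++ [p.2]], ([] : List String))
      else if p.1 = (path.length : Int) - 1 then (st.1 ++ [st.2 ++ [p.2]], st.2 ++ [p.2])
      else (st.1, st.2 ++ [p.2]))
    ([], [])
    (by
      intro acc p _
      dsimp only
      simp only [forkA_eq])]
  rw [loopA (forkOf edge_list) (path.length : Int) path 0 (by simp) [] [] (fun _ => rfl)]
  -- A's filter pass is a no-op on the produced segments
  rw [List.map_id']
  rw [List.nil_append]
  rw [PySem.List.foldl_congr_mem (specB (forkOf edge_list) [] path) _
    (fun (acc : List (List String)) (segment : List String) => acc ++ [segment]) []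
    (by
      intro acc seg hseg
      rcases specB_mem (forkOf edge_list) path [] seg (by simpa using hseg) with ⟨hne, hsub⟩
      have hfilter : seg.filter (fun node => path.contains node) = seg := by
        apply List.filter_eq_self.mpr
        intro a ha
        simp only [List.contains_iff_mem]
        simpa using hsub a ha
      dsimp only
      rw [hfilter, if_pos hne])]
  rw [PySem.List.foldl_append_singleton_eq_self]
  -- B's loop: replace the fork-set membership test by the canonical fork test
  rw [PySem.List.foldl_congr_mem (PySem.List.enumerate path) _
    (fun (st : List (List String) × Int) (p : Int × String) =>
      if forkOf edge_list p.2 then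
        (st.1 ++ [PySem.List.slice path (some st.2) (some (p.1 + 1))], p.1 + 1)
      else st)
    ([], 0)
    (by
      intro acc p _
      dsimp only
      rw [forkB_eq])]
  have hB := loopB (forkOf edge_list) path path.length 0 (by simp) 0 (le_refl 0) []
  simp only [flushB, List.drop_zero, List.take_zero, Nat.sub_zero, Nat.cast_zero,
    List.nil_append] at hB
  rw [hB]
  exact List.nil_append _
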